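-- pv_equiv track=rewrite | github.com/davistsui/ChicagoCrimeData | src/crime_type_analysis.py | mk_crime_type_num_dict
-- ===== SOURCE A (Python) =====
-- def mk_crime_type_num_dict(crime_type_num_list):
-- 	d = {}
--
-- 	for tup in crime_type_num_list:
-- 		info = tup[0]
-- 		year = info[0]
-- 		crime_type = info[1]
--
-- 		if year in d:
-- 			if crime_type in d[year]:
-- 				d[year][crime_type] += tup[1]
-- 			else:
-- 				d[year][crime_type] = tup[1]
-- 		else:
-- 			d[year] = {}
-- 			d[year][crime_type] = tup[1]
--
-- 	return d
-- ===== SOURCE B (Python) =====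
-- def mk_crime_type_num_dict(crime_type_num_list):
--     years = list(dict.fromkeys(tup[0][0] for tup in crime_type_num_list))
--     return {
--         y: {
--             t: sum(tup[1] for tup in crime_type_num_list
--                    if tup[0][0] == y and tup[0][1] == t)
--             for t in dict.fromkeys(tup[0][1] for tup in crime_type_num_list
--                                    if tup[0][0] == y)
--         }
--         for y in years
--     }
-- ===== Notes on version B (the rewrite author's own statement) =====
-- stated objective: alternative
-- what changed: Replaces A's incremental nested-dict mutation loop with a declarative two-level group-by: dedup the years, then for each year dedup its crime types and sum the matching counts with filters.
import Mathlib
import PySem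

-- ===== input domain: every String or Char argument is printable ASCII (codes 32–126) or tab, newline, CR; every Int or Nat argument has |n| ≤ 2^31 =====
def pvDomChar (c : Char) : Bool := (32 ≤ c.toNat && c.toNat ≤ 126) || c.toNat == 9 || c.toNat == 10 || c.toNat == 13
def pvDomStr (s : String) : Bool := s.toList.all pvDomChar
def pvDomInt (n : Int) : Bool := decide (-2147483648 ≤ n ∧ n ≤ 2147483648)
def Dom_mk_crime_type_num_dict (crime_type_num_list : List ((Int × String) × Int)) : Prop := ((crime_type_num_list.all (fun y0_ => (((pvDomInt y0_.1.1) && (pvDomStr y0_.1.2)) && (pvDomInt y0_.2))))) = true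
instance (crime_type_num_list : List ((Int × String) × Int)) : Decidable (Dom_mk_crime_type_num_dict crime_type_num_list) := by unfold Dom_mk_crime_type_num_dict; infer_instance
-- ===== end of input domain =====

-- B replaces A's incremental nested-dict mutation loop with a declarative group-by
-- (dedup years, then dedup types per year and sum matching counts); alternative
-- decomposition, no speed claim.

-- ===== PORT A =====
-- d[year] with 'year in d' known true is ported as getD with a default never used.
def mk_crime_type_num_dict (crime_type_num_list : List ((Int × String) × Int)) : List (Int × List (String × Int)) :=
  let d : PySem.Dict Int (PySem.Dict String Int) :=
    crime_type_num_list.foldl (fun d tup =>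
      let info := tup.1
      let year := info.1
      let crime_type := info.2
      if d.contains year then
        let inner := d.getD year PySem.Dict.empty
        if inner.contains crime_type then
          d.insert year (inner.insert crime_type (inner.getD crime_type 0 + tup.2))
        else
          d.insert year (inner.insert crime_type tup.2)
      else
        d.insert year (PySem.Dict.empty.insert crime_type tup.2)) PySem.Dict.empty
  d.items.map (fun p => (p.1, p.2.items))

-- ===== PORT B =====
def mk_crime_type_num_dict_alt (crime_type_num_list : List ((Int × String) × Int)) : List (Int × List (String × Int)) :=
  let years := PySem.List.dedup (crime_type_num_list.map (fun tup => tup.1.1))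
  years.map (fun y =>
    (y, (PySem.List.dedup ((crime_type_num_list.filter (fun tup => tup.1.1 == y)).map (fun tup => tup.1.2))).map
        (fun t => (t, ((crime_type_num_list.filter (fun tup => tup.1.1 == y && tup.1.2 == t)).map (fun tup => tup.2)).sum))))

-- ===== PRECONDITION & SPEC =====
def Spec_mk_crime_type_num_dict (crime_type_num_list : List ((Int × String) × Int)) (out : List (Int × List (String × Int))) : Prop := out = mk_crime_type_num_dict_alt crime_type_num_list
instance (crime_type_num_list : List ((Int × String) × Int)) (out : List (Int × List (String × Int))) : Decidable (Spec_mk_crime_type_num_dict crime_type_num_list out) := by unfold Spec_mk_crime_type_num_dict; infer_instance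

-- ===== CLAIM (what is proved, stated in full; the proofs are below) =====
def Claim_equal_mk_crime_type_num_dict : Prop := ∀ (crime_type_num_list : List ((Int × String) × Int)), Dom_mk_crime_type_num_dict crime_type_num_list → Spec_mk_crime_type_num_dict crime_type_num_list (mk_crime_type_num_dict crime_type_num_list)

-- ===== LEMMAS AND PROOFS =====

-- the inner (per-year) accumulation step of A, with the contains-test resolved
def pvInnerStep (inner : PySem.Dict String Int) (tup : (Int × String) × Int) : PySem.Dict String Int :=
  inner.insert tup.1.2 (inner.getD tup.1.2 0 + tup.2)

-- A's loop body equals an unconditional nested insert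
lemma pvStep_eq (d : PySem.Dict Int (PySem.Dict String Int)) (tup : (Int × String) × Int) :
    (if d.contains tup.1.1 then
        let inner := d.getD tup.1.1 PySem.Dict.empty
        if inner.contains tup.1.2 then
          d.insert tup.1.1 (inner.insert tup.1.2 (inner.getD tup.1.2 0 + tup.2))
        else
          d.insert tup.1.1 (inner.insert tup.1.2 tup.2)
      else
        d.insert tup.1.1 (PySem.Dict.empty.insert tup.1.2 tup.2))
    = d.insert tup.1.1 (pvInnerStep (d.getD tup.1.1 PySem.Dict.empty) tup) := by
  unfold pvInnerStep
  by_cases hy : d.contains tup.1.1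
  · simp only [hy, if_true]
    by_cases hc : (d.getD tup.1.1 PySem.Dict.empty).contains tup.1.2
    · simp [hc]
    · rw [PySem.Dict.getD_of_not_contains (d.getD tup.1.1 PySem.Dict.empty) 0 (by simpa using hc)]
      simp [hc]
  · rw [PySem.Dict.getD_of_not_contains _ _ (by simpa using hy)]
    simp [hy, PySem.Dict.getD_empty]

-- the per-slot value of A's outer fold is the inner fold of the year's rows
lemma pvOuter_getD (l : List ((Int × String) × Int)) (d : PySem.Dict Int (PySem.Dict String Int)) (y : Int) :
    (l.foldl (fun d tup => d.insert tup.1.1 (pvInnerStep (d.getD tup.1.1 PySem.Dict.empty) tup)) d).getD y PySem.Dict.empty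
      = (l.filter (fun tup => tup.1.1 == y)).foldl pvInnerStep (d.getD y PySem.Dict.empty) := by
  induction l generalizing d with
  | nil => simp
  | cons p l ih =>
    simp only [List.foldl_cons, List.filter_cons]
    rw [ih]
    by_cases h : p.1.1 = y
    · simp [h]
    · have : (p.1.1 == y) = false := by simpa using h
      simp [this, PySem.Dict.getD_insert, Ne.symm h]

-- value of the inner fold at a type t: sum of the matching counts
lemma pvInner_getD (l : List ((Int × String) × Int)) (d : PySem.Dict String Int) (t : String) :
    (l.foldl pvInnerStep d).getD t 0
      = d.getD t 0 + ((l.filter (fun tup => tup.1.2 == t)).map (fun tup => tup.2)).sum := by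
  induction l generalizing d with
  | nil => simp
  | cons p l ih =>
    simp only [List.foldl_cons, List.filter_cons]
    rw [ih]
    unfold pvInnerStep
    by_cases h : p.1.2 = t
    · simp [h]; ring
    · have : (p.1.2 == t) = false := by simpa using h
      simp [this, PySem.Dict.getD_insert, Ne.symm h]

-- a dict with nodup keys is its keys paired with their values
lemma pvItems_eq_keys_map {κ ν : Type} [BEq κ] [LawfulBEq κ] (d : PySem.Dict κ ν) (d0 : ν)
    (h : d.keys.Nodup) : d.items = d.keys.map (fun k => (k, d.getD k d0)) := by
  unfold PySem.Dict.keys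
  rw [List.map_map]
  conv_lhs => rw [← List.map_id d.items]
  refine List.map_congr_left fun p hp => ?_
  have h2 := PySem.Dict.getD_of_mem_items d (k := p.1) (v := p.2) (by simpa using hp) h d0
  simp [Function.comp, h2]

lemma pvFoldl_step_eq (l : List ((Int × String) × Int)) :
    (l.foldl (fun d tup =>
      let info := tup.1
      let year := info.1
      let crime_type := info.2
      if d.contains year then
        let inner := d.getD year PySem.Dict.empty
        if inner.contains crime_type then
          d.insert year (inner.insert crime_type (inner.getD crime_type 0 + tup.2))
        else
          d.insert year (inner.insert crime_type tup.2)
      else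
        d.insert year (PySem.Dict.empty.insert crime_type tup.2)) PySem.Dict.empty)
    = l.foldl (fun d tup => d.insert tup.1.1 (pvInnerStep (d.getD tup.1.1 PySem.Dict.empty) tup)) PySem.Dict.empty := by
  congr 1
  funext d tup
  exact pvStep_eq d tup

-- ===== VERDICT (by name: the statement is the Claim_ definition above) =====
theorem mk_crime_type_num_dict_spec : Claim_equal_mk_crime_type_num_dict := by
  intro l _
  show mk_crime_type_num_dict l = mk_crime_type_num_dict_alt l
  unfold mk_crime_type_num_dict mk_crime_type_num_dict_alt
  simp only [pvFoldl_step_eq]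
  set D := l.foldl (fun d tup => d.insert tup.1.1 (pvInnerStep (d.getD tup.1.1 PySem.Dict.empty) tup)) PySem.Dict.empty with hD
  have hkeys : D.keys = PySem.List.dedup (l.map (fun tup => tup.1.1)) := by
    rw [hD, PySem.Dict.keys_foldl_insert_key]
    simp [PySem.Set.update, PySem.Set.ofList_eq_foldl, PySem.List.dedup_eq_ofList, PySem.Dict.keys_empty]
  have hnodup : D.keys.Nodup := by
    rw [hD]
    exact PySem.Dict.nodup_keys_foldl_insert_key _ _ _ _ PySem.Dict.nodup_keys_empty
  rw [pvItems_eq_keys_map D PySem.Dict.empty hnodup, List.map_map, hkeys]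
  refine List.map_congr_left fun y _ => ?_
  simp only [Function.comp]
  congr 1
  -- inner dict for year y
  rw [hD, pvOuter_getD, PySem.Dict.getD_empty]
  set ly := l.filter (fun tup => tup.1.1 == y) with hly
  set I := ly.foldl pvInnerStep PySem.Dict.empty with hI
  have hIk : I.keys = PySem.List.dedup (ly.map (fun tup => tup.1.2)) := by
    have hk := PySem.Dict.keys_foldl_insert_key (ν := Int) ly (fun tup => tup.1.2)
      (fun inner tup => inner.getD tup.1.2 0 + tup.2) PySem.Dict.empty
    rw [hI]
    refine Eq.trans ?_ (hk.trans ?_)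
    · rfl
    · simp [PySem.Set.update, PySem.Set.ofList_eq_foldl, PySem.List.dedup_eq_ofList, PySem.Dict.keys_empty]
  have hIn : I.keys.Nodup := by
    rw [hI]
    exact PySem.Dict.nodup_keys_foldl_insert_key ly (fun tup => tup.1.2)
      (fun inner tup => inner.getD tup.1.2 0 + tup.2) _ PySem.Dict.nodup_keys_empty
  rw [pvItems_eq_keys_map I 0 hIn, hIk]
  refine List.map_congr_left fun t _ => ?_
  rw [hI, pvInner_getD, PySem.Dict.getD_empty, zero_add, hly, List.filter_filter]
  have hcomm : (fun (a : (Int × String) × Int) => a.1.2 == t && a.1.1 == y)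
      = (fun a => a.1.1 == y && a.1.2 == t) := by
    funext a; exact Bool.and_comm _ _
  rw [hcomm]
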